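-- pv_equiv track=rewrite | github.com/miliar/Code_Jam_Webscraper | solutions_python/Problem_203/445.py | fillline
-- ===== SOURCE A (Python) =====
-- def fillline(line):
--
--     ls = [c for c in line]
--     imin = 0
--     imax = 0
--     for i in range(len(ls)):
--         if ls[i] == '?':
--             imax += 1
--         else:
--             for j in range(imin,imax):
--                 ls[j] = ls[i]
--             imin = i+1
--             imax = i+1
--     if imax != imin:
--         for j in range(imin,imax):
--             ls[j] = ls[imin-1]
--     return "".join(ls)
-- ===== SOURCE B (Python) =====
-- def fillline(line):
--     ls = list(line)
--     nxt = None
--     for i in range(len(ls) - 1, -1, -1):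
--         if ls[i] != '?':
--             nxt = ls[i]
--         elif nxt is not None:
--             ls[i] = nxt
--     prev = None
--     for i in range(len(ls)):
--         if ls[i] != '?':
--             prev = ls[i]
--         elif prev is not None:
--             ls[i] = prev
--     return "".join(ls)
-- ===== Notes on version B (the rewrite author's own statement) =====
-- stated objective: alternative
-- what changed: Replaced A's index/run bookkeeping (imin/imax counters with nested back-fill loops) by two directional sweeps: a right-to-left sweep filling each unknown position with the next known char, then a left-to-right sweep filling the remaining trailing run with the last known char.
import Mathlib
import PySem

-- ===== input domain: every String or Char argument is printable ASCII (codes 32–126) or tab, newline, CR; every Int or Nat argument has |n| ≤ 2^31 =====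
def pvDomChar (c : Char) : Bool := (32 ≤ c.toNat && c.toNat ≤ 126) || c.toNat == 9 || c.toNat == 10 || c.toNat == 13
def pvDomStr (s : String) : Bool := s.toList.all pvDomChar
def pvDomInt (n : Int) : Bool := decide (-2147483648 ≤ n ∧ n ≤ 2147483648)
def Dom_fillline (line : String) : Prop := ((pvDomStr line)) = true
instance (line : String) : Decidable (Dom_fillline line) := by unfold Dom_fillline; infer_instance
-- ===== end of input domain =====

-- B replaces A's imin/imax run bookkeeping by two directional sweeps (right-to-left then left-to-right); same O(n) cost, different decomposition.

-- ===== PORT A =====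
-- the main for-loop body of A (state: (ls, imin, imax))
def filllineBody (s : List Char × Int × Int) (i : Int) : List Char × Int × Int :=
  if PySem.List.pyGetD s.1 i ' ' = '?' then (s.1, s.2.1, s.2.2 + 1)
  else
    ((PySem.List.pyRange s.2.1 s.2.2 1).foldl
        (fun a j => PySem.List.pySetD a j (PySem.List.pyGetD a i ' ')) s.1,
     i + 1, i + 1)

def fillline (line : String) : String :=
  let ls0 := line.toList
  let st := (PySem.List.pyRange 0 (ls0.length : Int) 1).foldl filllineBody (ls0, (0 : Int), (0 : Int))
  if st.2.2 ≠ st.2.1 then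
    String.mk ((PySem.List.pyRange st.2.1 st.2.2 1).foldl
      (fun a j => PySem.List.pySetD a j (PySem.List.pyGetD a (st.2.1 - 1) ' ')) st.1)
  else String.mk st.1

-- ===== PORT B =====
-- right-to-left sweep: returns the rewritten list and the nearest known char (nxt)
def bsRec : List Char → List Char × Option Char
  | [] => ([], none)
  | c :: r =>
    let p := bsRec r
    if c ≠ '?' then (c :: p.1, some c)
    else ((p.2.getD '?') :: p.1, p.2)

-- left-to-right sweep: prev = last known char seen
def fsRec : Option Char → List Char → List Char
  | _, [] => []
  | prev, c :: r => if c ≠ '?' then c :: fsRec (some c) r else (prev.getD '?') :: fsRec prev r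

def fillline_alt (line : String) : String := String.mk (fsRec none (bsRec line.toList).1)

-- ===== PRECONDITION & SPEC =====
def Spec_fillline (line : String) (out : String) : Prop := out = fillline_alt line
instance (line : String) (out : String) : Decidable (Spec_fillline line out) := by unfold Spec_fillline; infer_instance

-- ===== CLAIM (what is proved, stated in full; the proofs are below) =====
def Claim_equal_fillline : Prop := ∀ (line : String), Dom_fillline line → Spec_fillline line (fillline line)

-- ===== LEMMAS AND PROOFS =====

-- length of the trailing '?' run
def trailQ : List Char → Nat
  | [] => 0
  | c :: r => if c = '?' ∧ trailQ r = r.length then r.length + 1 else trailQ r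

def allQ (l : List Char) : Prop := ∀ c ∈ l, c = '?'

theorem trailQ_le (l : List Char) : trailQ l ≤ l.length := by
  induction l with
  | nil => simp [trailQ]
  | cons c r ih => simp only [trailQ]; split <;> simp <;> omega

theorem trailQ_eq_len_iff (l : List Char) : trailQ l = l.length ↔ allQ l := by
  induction l with
  | nil => simp [trailQ, allQ]
  | cons c r ih =>
    simp only [trailQ, allQ, List.mem_cons] at *
    constructor
    · intro h
      split at h
      · rename_i hc
        exact fun x hx => hx.elim (fun h1 => h1 ▸ hc.1) (fun h2 => (ih.1 hc.2) x h2)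
      · rename_i hc
        have := trailQ_le r
        simp at h; omega
    · intro h
      have hc : c = '?' := h c (Or.inl rfl)
      have hr : trailQ r = r.length := ih.2 (fun x hx => h x (Or.inr hx))
      simp [hc, hr]

theorem trailQ_cons_of_not_allQ (c : Char) (r : List Char) (h : ¬ allQ r) :
    trailQ (c :: r) = trailQ r := by
  simp only [trailQ]
  split
  · rename_i hc; exact absurd ((trailQ_eq_len_iff r).1 hc.2) h
  · rfl

theorem allQ_replicate (m : Nat) : allQ (List.replicate m '?') := by
  intro c hc; exact (List.eq_of_mem_replicate hc)

theorem allQ_eq_replicate (l : List Char) (h : allQ l) : l = List.replicate l.length '?' :=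
  List.eq_replicate_of_mem h

theorem trailQ_replicate (m : Nat) : trailQ (List.replicate m '?') = m := by
  have := (trailQ_eq_len_iff (List.replicate m '?')).2 (allQ_replicate m)
  simpa using this

theorem trailQ_cons_ne (c : Char) (r : List Char) (hc : c ≠ '?') : trailQ (c :: r) = trailQ r := by
  simp only [trailQ]
  split
  · rename_i h; exact absurd h.1 hc
  · rfl

theorem trailQ_append_cons (x : List Char) (c : Char) (r : List Char) (hc : c ≠ '?') :
    trailQ (x ++ c :: r) = trailQ r := by
  induction x with
  | nil => simpa using trailQ_cons_ne c r hc
  | cons a x ih =>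
    have hna : ¬ allQ (x ++ c :: r) := by
      intro h; exact hc (h c (by simp))
    rw [List.cons_append, trailQ_cons_of_not_allQ _ _ hna, ih]

theorem bs_allQ (l : List Char) (h : allQ l) : bsRec l = (l, none) := by
  induction l with
  | nil => rfl
  | cons c r ih =>
    have hc : c = '?' := h c (List.mem_cons_self)
    have hr := ih (fun x hx => h x (List.mem_cons_of_mem _ hx))
    simp [bsRec, hc, hr]

theorem bs_len (l : List Char) : (bsRec l).1.length = l.length := by
  induction l with
  | nil => rfl
  | cons c r ih => simp only [bsRec]; split <;> simp [ih]

theorem bs_snd_ne (l : List Char) (e : Char) (h : (bsRec l).2 = some e) : e ≠ '?' := by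
  induction l with
  | nil => simp [bsRec] at h
  | cons c r ih =>
    simp only [bsRec] at h
    split at h
    · rename_i hc; simp at h; exact h ▸ hc
    · exact ih h

theorem bs_snd_none (l : List Char) (h : (bsRec l).2 = none) : allQ l := by
  induction l with
  | nil => intro c hc; simp at hc
  | cons c r ih =>
    simp only [bsRec] at h
    split at h
    · simp at h
    · rename_i hc
      intro x hx
      rcases List.mem_cons.1 hx with h1 | h2
      · simp at hc; exact h1 ▸ hc
      · exact ih h x h2

theorem bs_repl_app (m : Nat) (rest : List Char) :
    bsRec (List.replicate m '?' ++ rest) =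
      (List.replicate m ((bsRec rest).2.getD '?') ++ (bsRec rest).1, (bsRec rest).2) := by
  induction m with
  | zero => simp
  | succ k ih => simp [List.replicate_succ, bsRec, ih]

-- BSgood: when l has a known char, bsRec l splits into a '?'-free prefix and the trailing '?' run
theorem bs_good (l : List Char) (h : ¬ allQ l) :
    ∃ d : List Char, (bsRec l).1 = d ++ List.replicate (trailQ l) '?' ∧ '?' ∉ d ∧ d ≠ [] := by
  induction l with
  | nil => exact absurd (by intro c hc; simp at hc) h
  | cons c r ih =>
    by_cases hc : c = '?'
    · have hr : ¬ allQ r := by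
        intro hr
        refine h ?_
        intro x hx
        rcases List.mem_cons.1 hx with h1 | h2
        · exact h1 ▸ hc
        · exact hr x h2
      obtain ⟨d, hd, hq, hne⟩ := ih hr
      obtain ⟨e, he⟩ : ∃ e, (bsRec r).2 = some e := by
        cases hsnd : (bsRec r).2 with
        | none => exact absurd (bs_snd_none r hsnd) hr
        | some e => exact ⟨e, rfl⟩
      refine ⟨e :: d, ?_, ?_, by simp⟩
      · simp [bsRec, hc, he, hd, trailQ_cons_of_not_allQ _ _ hr]
      · simp [hq]
        exact fun hh => bs_snd_ne r e he hh.symm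
    · by_cases hr : allQ r
      · refine ⟨[c], ?_, by simp [Ne.symm hc], by simp⟩
        have h1 := bs_allQ r hr
        have h3 : trailQ (c :: r) = r.length := by
          rw [trailQ_cons_ne c r hc, (trailQ_eq_len_iff r).2 hr]
        simp [bsRec, hc, h1, h3]
        exact allQ_eq_replicate r hr
      · obtain ⟨d, hd, hq, hne⟩ := ih hr
        refine ⟨c :: d, ?_, by simp [hq, Ne.symm hc], by simp⟩
        simp [bsRec, hc, hd, trailQ_cons_of_not_allQ _ _ hr]

theorem fs_repl (t : Nat) (prev : Option Char) :
    fsRec prev (List.replicate t '?') = List.replicate t (prev.getD '?') := by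
  induction t generalizing prev with
  | zero => rfl
  | succ k ih => simp [List.replicate_succ, fsRec, ih]

theorem fs_app (d : List Char) (hq : '?' ∉ d) (hne : d ≠ []) (x : List Char) (prev : Option Char) :
    fsRec prev (d ++ x) = d ++ fsRec (some (d.getLast hne)) x := by
  induction d generalizing prev with
  | nil => exact absurd rfl hne
  | cons a d ih =>
    have ha : a ≠ '?' := fun e => hq (e ▸ List.mem_cons_self)
    cases d with
    | nil => simp [fsRec, ha]
    | cons b d =>
      have hq' : '?' ∉ b :: d := fun hh => hq (List.mem_cons_of_mem _ hh)
      rw [List.cons_append, fsRec, if_pos (by simpa using ha)]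
      rw [ih hq' (by simp) (some a)]
      rfl

theorem setQ (idxs : List Int) (n : Nat) (hn : n ≠ 0) (h : ∀ j ∈ idxs, 0 ≤ j) :
    idxs.foldl (fun a j => PySem.List.pySetD a j (PySem.List.pyGetD a (-1) ' '))
      (List.replicate n '?') = List.replicate n '?' := by
  induction idxs with
  | nil => rfl
  | cons j js ih =>
    have hj : 0 ≤ j := h j (by simp)
    have hr : List.replicate n '?' ≠ ([] : List Char) := by simp [hn]
    rw [List.foldl_cons, PySem.List.pyGetD_neg_one _ _ hr, List.getLast_replicate,
      PySem.List.pySetD_of_nonneg _ _ hj, List.set_replicate_self]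
    exact ih (fun x hx => h x (by simp [hx]))

theorem getD_mid (pre mid suf : List Char) (c : Char) (k : Nat) (hk : k = pre.length + mid.length) :
    (pre ++ mid ++ c :: suf).getD k ' ' = c := by
  subst hk
  have h1 : (pre ++ mid).length ≤ pre.length + mid.length := by simp
  rw [List.getD_eq_getElem?_getD, List.getElem?_append_right h1]
  simp

theorem set_at (pre rest : List Char) (a v : Char) :
    (pre ++ a :: rest).set pre.length v = pre ++ v :: rest := by
  induction pre with
  | nil => rfl
  | cons p ps ih => simp [List.set, ih]

theorem fill1 (m : Nat) (pre suf : List Char) (c : Char) (k : Nat) (hk : k = pre.length + m) :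
    (PySem.List.pyRange (pre.length : Int) (k : Int) 1).foldl
      (fun a j => PySem.List.pySetD a j (PySem.List.pyGetD a (k : Int) ' '))
      (pre ++ List.replicate m '?' ++ c :: suf)
    = pre ++ List.replicate m c ++ c :: suf := by
  induction m generalizing pre with
  | zero =>
    rw [PySem.List.pyRange_one_eq_nil (by push_cast; omega)]
    simp
  | succ mm ih =>
    rw [PySem.List.pyRange_one_cons (by push_cast; omega), List.foldl_cons]
    have hg : PySem.List.pyGetD (pre ++ List.replicate (mm+1) '?' ++ c :: suf) (k : Int) ' ' = c := by
      rw [PySem.List.pyGetD_natCast]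
      exact getD_mid pre _ suf c k (by simpa using hk)
    rw [hg]
    have hs : PySem.List.pySetD (pre ++ List.replicate (mm+1) '?' ++ c :: suf) (pre.length : Int) c
        = (pre ++ [c]) ++ List.replicate mm '?' ++ c :: suf := by
      rw [PySem.List.pySetD_natCast, List.replicate_succ]
      rw [show pre ++ ('?' :: List.replicate mm '?') ++ c :: suf
            = pre ++ '?' :: (List.replicate mm '?' ++ c :: suf) by simp]
      rw [set_at]
      simp
    rw [hs]
    have hcast : (pre.length : Int) + 1 = ((pre ++ [c]).length : Int) := by simp
    rw [hcast]
    rw [ih (pre ++ [c]) (by simp at hk ⊢; omega)]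
    simp [List.replicate_succ]

theorem fill2 (t : Nat) (pre : List Char) (c : Char) (p : Int)
    (hp : 0 ≤ p) (hpl : p.toNat < pre.length) (hc : pre[p.toNat]? = some c) :
    (PySem.List.pyRange (pre.length : Int) ((pre.length + t : Nat) : Int) 1).foldl
      (fun a j => PySem.List.pySetD a j (PySem.List.pyGetD a p ' '))
      (pre ++ List.replicate t '?')
    = pre ++ List.replicate t c := by
  induction t generalizing pre with
  | zero =>
    rw [PySem.List.pyRange_one_eq_nil (by push_cast; omega)]
    simp
  | succ tt ih =>
    rw [PySem.List.pyRange_one_cons (by push_cast; omega), List.foldl_cons]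
    have hlen : p < ((pre ++ List.replicate (tt+1) '?').length : Int) := by
      simp; omega
    have hg : PySem.List.pyGetD (pre ++ List.replicate (tt+1) '?') p ' ' = c := by
      rw [PySem.List.pyGetD_eq_getElem _ ' ' hp hlen]
      have h9 : (pre ++ List.replicate (tt+1) '?')[p.toNat]? = some c := by
        rw [List.getElem?_append_left hpl]; exact hc
      rw [List.getElem?_eq_getElem (by simp; omega)] at h9
      exact Option.some.inj h9
    rw [hg]
    have hs : PySem.List.pySetD (pre ++ List.replicate (tt+1) '?') (pre.length : Int) c
        = (pre ++ [c]) ++ List.replicate tt '?' := by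
      rw [PySem.List.pySetD_natCast, List.replicate_succ, set_at]
      simp
    rw [hs]
    have hcast : (pre.length : Int) + 1 = ((pre ++ [c]).length : Int) := by simp
    have hcast2 : ((pre.length + (tt+1) : Nat) : Int) = (((pre ++ [c]).length + tt : Nat) : Int) := by
      simp; omega
    rw [hcast, hcast2]
    rw [ih (pre ++ [c]) (by simp; omega)
        (by rw [List.getElem?_append_left (by omega)]; exact hc)]
    simp [List.replicate_succ]

-- main loop characterisation
theorem loopA (rest : List Char) (pre : List Char) (m : Nat) :
    (PySem.List.pyRange ((pre.length + m : Nat) : Int) ((pre.length + m + rest.length : Nat) : Int) 1).foldl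
      filllineBody (pre ++ List.replicate m '?' ++ rest, ((pre.length : Nat) : Int), ((pre.length + m : Nat) : Int))
    = (pre ++ (bsRec (List.replicate m '?' ++ rest)).1,
       ((pre.length + m + rest.length - trailQ (List.replicate m '?' ++ rest) : Nat) : Int),
       ((pre.length + m + rest.length : Nat) : Int)) := by
  induction rest generalizing pre m with
  | nil =>
    simp only [List.length_nil, List.append_nil, Nat.add_zero]
    rw [PySem.List.pyRange_one_eq_nil le_rfl]
    rw [bs_allQ _ (allQ_replicate m), trailQ_replicate]
    simp only [List.foldl_nil]
    have hmm : pre.length + m - m = pre.length := by omega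
    rw [hmm]
  | cons c r ih =>
    rw [PySem.List.pyRange_one_cons (by simp only [List.length_cons]; push_cast; omega), List.foldl_cons]
    have hg : PySem.List.pyGetD (pre ++ List.replicate m '?' ++ c :: r) ((pre.length + m : Nat) : Int) ' ' = c := by
      rw [PySem.List.pyGetD_natCast]
      exact getD_mid pre _ r c _ (by simp)
    by_cases hc : c = '?'
    · subst hc
      have hbody : filllineBody (pre ++ List.replicate m '?' ++ '?' :: r, ((pre.length : Nat) : Int), ((pre.length + m : Nat) : Int)) ((pre.length + m : Nat) : Int)
          = (pre ++ List.replicate (m+1) '?' ++ r, ((pre.length : Nat) : Int), ((pre.length + (m+1) : Nat) : Int)) := by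
        simp only [filllineBody, hg, reduceIte]
        refine congrArg₂ Prod.mk ?_ (congrArg₂ Prod.mk rfl ?_)
        · simp [List.replicate_succ']
        · push_cast; ring
      rw [hbody]
      have hlist : List.replicate m '?' ++ '?' :: r = List.replicate (m+1) '?' ++ r := by
        simp [List.replicate_succ']
      rw [hlist]
      have e1 : ((pre.length + m : Nat) : Int) + 1 = ((pre.length + (m+1) : Nat) : Int) := by push_cast; ring
      have e3 : pre.length + m + (r.length + 1) = pre.length + (m+1) + r.length := by omega
      simp only [List.length_cons, e1, e3]
      exact ih pre (m+1)
    · have hbody : filllineBody (pre ++ List.replicate m '?' ++ c :: r, ((pre.length : Nat) : Int), ((pre.length + m : Nat) : Int)) ((pre.length + m : Nat) : Int)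
          = ((pre ++ List.replicate m c ++ [c]) ++ List.replicate 0 '?' ++ r,
             (((pre ++ List.replicate m c ++ [c]).length : Nat) : Int),
             (((pre ++ List.replicate m c ++ [c]).length + 0 : Nat) : Int)) := by
        simp only [filllineBody, hg, if_neg hc]
        refine congrArg₂ Prod.mk ?_ (congrArg₂ Prod.mk ?_ ?_)
        · rw [fill1 m pre r c (pre.length + m) rfl]
          simp
        · simp only [List.length_append, List.length_replicate, List.length_cons, List.length_nil]
          push_cast; ring
        · simp only [List.length_append, List.length_replicate, List.length_cons, List.length_nil]
          push_cast; ring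
      rw [hbody]
      have e1 : ((pre.length + m : Nat) : Int) + 1 = (((pre ++ List.replicate m c ++ [c]).length + 0 : Nat) : Int) := by
        simp only [List.length_append, List.length_replicate, List.length_cons, List.length_nil]
        push_cast; ring
      have e2 : ((pre.length + m + (c :: r).length : Nat) : Int)
          = (((pre ++ List.replicate m c ++ [c]).length + 0 + r.length : Nat) : Int) := by
        simp only [List.length_append, List.length_replicate, List.length_cons, List.length_nil]
        push_cast; ring
      rw [e1, e2, ih (pre ++ List.replicate m c ++ [c]) 0]
      simp only [List.replicate_zero, List.nil_append]
      have hbs : (bsRec (List.replicate m '?' ++ c :: r)).1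
          = List.replicate m c ++ c :: (bsRec r).1 := by
        rw [bs_repl_app]
        simp [bsRec, hc]
      have htr : trailQ (List.replicate m '?' ++ c :: r) = trailQ r :=
        trailQ_append_cons _ c r hc
      refine congrArg₂ Prod.mk ?_ (congrArg₂ Prod.mk ?_ ?_)
      · rw [hbs]; simp
      · rw [htr]
        have h1 : trailQ r ≤ r.length := trailQ_le r
        simp only [List.length_append, List.length_replicate, List.length_cons, List.length_nil]
        omega
      · simp only [List.length_append, List.length_replicate, List.length_cons, List.length_nil]
theorem getLast_getElem? (d : List Char) (hne : d ≠ []) :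
    d[d.length - 1]? = some (d.getLast hne) := by
  rw [← List.getLast?_eq_getElem?, List.getLast?_eq_getLast hne]

-- ===== VERDICT (by name: the statement is the Claim_ definition above) =====
theorem fillline_spec : Claim_equal_fillline := by
  intro line _
  unfold Spec_fillline
  simp only [fillline, fillline_alt]
  generalize line.toList = l
  have hloop := loopA l [] 0
  simp only [List.length_nil, List.replicate_zero, List.nil_append, Nat.zero_add, Nat.add_zero,
    Nat.cast_zero] at hloop
  rw [hloop]
  dsimp only
  by_cases hall : allQ l
  · have ht : trailQ l = l.length := (trailQ_eq_len_iff l).2 hall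
    have hbs : (bsRec l).1 = l := by rw [bs_allQ l hall]
    rw [hbs, ht]
    by_cases hn : l.length = 0
    · rw [if_neg (by omega), List.eq_nil_of_length_eq_zero hn]
      rfl
    · rw [if_pos (by omega)]
      have e0 : ((l.length - l.length : Nat) : Int) = 0 := by omega
      rw [e0]
      have hrepl := allQ_eq_replicate l hall
      rw [hrepl]
      rw [show (0 : Int) - 1 = -1 by ring]
      rw [setQ _ l.length hn (by intro j hj; exact (PySem.List.mem_pyRange_one.1 hj).1)]
      rw [fs_repl]
      rfl
  · obtain ⟨d, hd, hq, hne⟩ := bs_good l hall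
    have hlen : d.length + trailQ l = l.length := by
      have hb := bs_len l
      rw [hd] at hb
      simpa using hb
    rw [hd]
    by_cases ht0 : trailQ l = 0
    · rw [if_neg (by omega)]
      rw [ht0, List.replicate_zero, List.append_nil]
      have h5 : fsRec none d = d := by
        have h6 := fs_app d hq hne [] none
        simpa [fsRec] using h6
      rw [h5]
    · rw [if_pos (by omega)]
      have e1 : ((l.length - trailQ l : Nat) : Int) = (d.length : Int) := by omega
      have e2 : ((l.length : Nat) : Int) = ((d.length + trailQ l : Nat) : Int) := by omega
      rw [e1, e2]
      have hdpos : 0 < d.length := List.length_pos_iff.2 hne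
      have hp : (0 : Int) ≤ (d.length : Int) - 1 := by omega
      have hpl : ((d.length : Int) - 1).toNat < d.length := by omega
      have hc : d[((d.length : Int) - 1).toNat]? = some (d.getLast hne) := by
        have e3 : ((d.length : Int) - 1).toNat = d.length - 1 := by omega
        rw [e3]
        exact getLast_getElem? d hne
      rw [fill2 (trailQ l) d (d.getLast hne) ((d.length : Int) - 1) hp hpl hc]
      rw [fs_app d hq hne (List.replicate (trailQ l) '?') none, fs_repl]
      rfl
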